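-- pv_equiv track=rewrite | github.com/jano31415/codejam | codeforces/793_round_div2/probc.py | solve
-- ===== SOURCE A (Python) =====
-- def solve(n,arr):
--     keys = set(arr)
--     counter = {k:0 for k in keys}
--     for a in arr:
--         counter[a] += 1
--
--     res = 0
--     round = False
--     for k in counter:
--         if counter[k] >= 2:
--             res+=2
--         if counter[k] == 1:
--             res+=1
--             round=True
--
--     if round:
--         res = res + res%2
--     return res//2
-- ===== SOURCE B (Python) =====
-- def solve(n, arr):
--     # Partition-and-recurse: repeatedly strip ALL copies of the first remaining
--     # value; count distinct values and how many occurred exactly once; answer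
--     # is distinct - singles // 2 (each lone value pairs up with another lone one).
--     distinct = 0
--     singles = 0
--     rest = list(arr)
--     while rest:
--         x = rest[0]
--         cnt = rest.count(x)
--         rest = [y for y in rest if y != x]
--         distinct += 1
--         if cnt == 1:
--             singles += 1
--     return distinct - singles // 2
-- ===== Notes on version B (the rewrite author's own statement) =====
-- stated objective: alternative
-- what changed: Replaces A's dict-of-counts plus accumulator-with-round-flag and parity-adjust-then-halve by a dict-free partition loop that repeatedly strips all copies of the first remaining value, tallying distinct values and singletons, and returns distinct - singles//2.
import Mathlib
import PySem

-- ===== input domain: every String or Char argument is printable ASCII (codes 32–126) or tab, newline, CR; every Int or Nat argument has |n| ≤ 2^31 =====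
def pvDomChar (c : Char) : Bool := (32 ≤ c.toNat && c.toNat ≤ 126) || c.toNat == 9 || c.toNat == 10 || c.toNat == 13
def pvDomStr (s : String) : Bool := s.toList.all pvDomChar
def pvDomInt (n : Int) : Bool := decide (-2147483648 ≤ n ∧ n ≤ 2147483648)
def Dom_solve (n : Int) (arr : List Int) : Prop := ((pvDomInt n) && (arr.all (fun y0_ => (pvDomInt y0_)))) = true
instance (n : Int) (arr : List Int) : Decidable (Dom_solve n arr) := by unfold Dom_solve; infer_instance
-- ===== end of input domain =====

-- B drops A's dict of counts, running accumulator with a boolean round flag and the final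
-- parity-adjust-then-halve: it repeatedly strips all copies of the first remaining value
-- (a dict-free partition loop), tallying distinct values and singletons, and returns
-- distinct - singles//2; objective: alternative (same answers, different algorithm).

-- ===== PORT A =====
-- keys = set(arr); {k:0 for k in keys}; counter[a] += 1 (key always present, so modify is exact)
def solve (n : Int) (arr : List Int) : Int :=
  let keys : PySem.Set Int := PySem.Set.ofList arr
  let counter0 : PySem.Dict Int Int := keys.foldl (fun d k => d.insert k 0) PySem.Dict.empty
  let counter : PySem.Dict Int Int := arr.foldl (fun d a => d.modify a 0 (· + 1)) counter0
  let st : Int × Bool := counter.keys.foldl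
    (fun (st : Int × Bool) k =>
      let res1 := if 2 ≤ counter.getD k 0 then st.1 + 2 else st.1
      if counter.getD k 0 = 1 then (res1 + 1, true) else (res1, st.2))
    (0, false)
  let res : Int := if st.2 then st.1 + PySem.Int.mod st.1 2 else st.1
  PySem.Int.floordiv res 2

-- ===== PORT B =====
-- the while loop of Source B: state (distinct, singles, rest); terminates since the filter shrinks rest
def solveLoop (rest : List Int) (distinct singles : Int) : Int × Int :=
  match rest with
  | [] => (distinct, singles)
  | x :: tl =>
    let cnt : Int := ((x :: tl).count x : Int)
    let rest' := (x :: tl).filter (fun y => y ≠ x)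
    solveLoop rest' (distinct + 1) (singles + if cnt = 1 then 1 else 0)
termination_by rest.length
decreasing_by
  simp only [List.filter_cons, ne_eq, decide_not, decide_true, Bool.not_true,
    List.length_cons]
  exact Nat.lt_succ_of_le (List.length_filter_le _ _)


def solve_alt (n : Int) (arr : List Int) : Int :=
  let ds := solveLoop arr 0 0
  ds.1 - PySem.Int.floordiv ds.2 2

-- ===== PRECONDITION & SPEC =====
def Spec_solve (n : Int) (arr : List Int) (out : Int) : Prop := out = solve_alt n arr
instance (n : Int) (arr : List Int) (out : Int) : Decidable (Spec_solve n arr out) := by unfold Spec_solve; infer_instance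

-- ===== CLAIM (what is proved, stated in full; the proofs are below) =====
def Claim_equal_solve : Prop := ∀ (n : Int) (arr : List Int), Dom_solve n arr → Spec_solve n arr (solve n arr)

-- ===== LEMMAS AND PROOFS =====

-- A side ------------------------------------------------------------------

lemma getD_zero_init (keys : List Int) (d : PySem.Dict Int Int)
    (h : ∀ v, d.getD v 0 = 0) (v : Int) :
    (keys.foldl (fun d k => d.insert k 0) d).getD v 0 = 0 := by
  induction keys generalizing d with
  | nil => exact h v
  | cons k t ih =>
      simp only [List.foldl_cons]
      exact ih _ (fun w => by rw [PySem.Dict.getD_insert]; split <;> simp [h])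

lemma counterA_getD (arr : List Int) (v : Int) :
    ((arr.foldl (fun d a => d.modify a 0 (· + 1))
        ((PySem.Set.ofList arr).foldl (fun d k => d.insert k 0) PySem.Dict.empty)).getD v 0)
      = (arr.count v : Int) := by
  rw [PySem.Dict.getD_foldl_modify_add_one,
      getD_zero_init _ _ (fun w => by simp [PySem.Dict.getD_empty])]
  ring

lemma counterA_keys (arr : List Int) :
    (arr.foldl (fun d a => d.modify a 0 (· + 1))
        ((PySem.Set.ofList arr).foldl (fun d k => d.insert k 0)
          (PySem.Dict.empty : PySem.Dict Int Int))).keys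
      = PySem.Set.ofList arr := by
  rw [PySem.Dict.keys_foldl_modify, PySem.Dict.keys_foldl_insert]
  simp only [PySem.Dict.keys_empty]
  rw [PySem.Set.update_nil_left, PySem.Set.ofList_ofList,
      PySem.Set.update_eq_append_filter]
  have h : (PySem.Set.ofList arr).filter
      (fun y => !(PySem.Set.contains (PySem.Set.ofList arr) y)) = [] := by
    apply List.filter_eq_nil_iff.mpr
    intro x hx
    have hxa : x ∈ arr := (PySem.Set.mem_ofList _ _).mp hx
    simp [PySem.Set.contains_eq_listContains, hxa]
  rw [h, List.append_nil]

lemma loopA (c : Int → Int) (l : List Int) (r0 : Int) (b0 : Bool) :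
    l.foldl (fun (st : Int × Bool) k =>
        let res1 := if 2 ≤ c k then st.1 + 2 else st.1
        if c k = 1 then (res1 + 1, true) else (res1, st.2)) (r0, b0)
      = (r0 + 2 * (l.countP (fun k => decide (2 ≤ c k)) : Int)
           + (l.countP (fun k => c k == 1) : Int),
         b0 || l.any (fun k => c k == 1)) := by
  induction l generalizing r0 b0 with
  | nil => simp
  | cons k t ih =>
      rw [List.foldl_cons]
      have hpair : (let res1 := if 2 ≤ c k then ((r0, b0) : Int × Bool).1 + 2 else ((r0, b0) : Int × Bool).1
          if c k = 1 then (res1 + 1, true) else (res1, ((r0, b0) : Int × Bool).2))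
        = ((if 2 ≤ c k then r0 + 2 else r0) + (if c k = 1 then 1 else 0),
           b0 || (c k == 1)) := by
        by_cases h1 : c k = 1 <;> simp [h1]
      rw [hpair, ih]
      simp only [List.countP_cons, List.any_cons]
      apply Prod.ext
      · by_cases h2 : 2 ≤ c k <;> by_cases h1 : c k = 1 <;>
          simp [h1, h2] <;> omega
      · simp [Bool.or_assoc]

-- B side ------------------------------------------------------------------

lemma ofList_cons_perm (x : Int) (tl : List Int) :
    (PySem.Set.ofList (x :: tl)).Perm
      (x :: PySem.Set.ofList (tl.filter (fun y => y ≠ x))) := by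
  apply (List.perm_ext_iff_of_nodup (PySem.Set.nodup_ofList _) ?_).mpr
  · intro a
    simp only [PySem.Set.mem_ofList, List.mem_cons, List.mem_filter, ne_eq, decide_eq_true_eq]
    by_cases hax : a = x <;> simp [hax]
  · refine List.nodup_cons.mpr ⟨?_, PySem.Set.nodup_ofList _⟩
    intro hx
    have := (PySem.Set.mem_ofList _ _).mp hx
    simp at this

lemma solveLoop_eq (arr : List Int) (d0 s0 : Int) :
    solveLoop arr d0 s0
      = (d0 + ((PySem.Set.ofList arr).length : Int),
         s0 + ((PySem.Set.ofList arr).countP (fun k => (arr.count k : Int) == 1) : Int)) := by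
  fun_induction solveLoop arr d0 s0 with
  | case1 d0 s0 => simp [PySem.Set.ofList]
  | case2 d0 s0 x tl cnt rest' ih =>
      have hperm := ofList_cons_perm x tl
      have hlen := hperm.length_eq
      have hrest' : rest' = tl.filter (fun y => y ≠ x) := by
        simp [rest']
      have hcnt : (PySem.Set.ofList (x :: tl)).countP (fun k => (((x :: tl).count k : Int)) == 1)
          = (x :: PySem.Set.ofList (tl.filter (fun y => y ≠ x))).countP
              (fun k => (((x :: tl).count k : Int)) == 1) := hperm.countP_eq _
      have hcong : (PySem.Set.ofList (tl.filter (fun y => y ≠ x))).countP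
              (fun k => (((x :: tl).count k : Int)) == 1)
          = (PySem.Set.ofList (tl.filter (fun y => y ≠ x))).countP
              (fun k => (((tl.filter (fun y => y ≠ x)).count k : Int)) == 1) := by
        apply List.countP_congr
        intro k hk
        have hk' := (PySem.Set.mem_ofList _ _).mp hk
        have hkx : k ≠ x := by
          rcases List.mem_filter.mp hk' with ⟨-, h⟩
          simpa using h
        have h1 : (x :: tl).count k = tl.count k := by
          simp [Ne.symm hkx]
        have h2 : (tl.filter (fun y => y ≠ x)).count k = tl.count k := by
          rw [List.count_filter (by simpa using hkx)]
        simp only [ne_eq, decide_not] at h2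
        simp [h1, h2]
      simp only [dite_eq_ite] at ih
      rw [ih]
      apply Prod.ext
      · simp only [hrest', hlen, List.length_cons]
        push_cast
        ring
      · simp only [hrest']
        rw [hcnt, List.countP_cons, hcong]
        by_cases h1 : cnt = 1
        · have h0 : tl.count x = 0 := by
            simp only [cnt, List.count_cons_self] at h1; push_cast at h1; omega
          have hx : (((x :: tl).count x : Int) == 1) = true := by
            simp [h0]
          simp [h1, h0]; ring
        · have h0 : tl.count x ≠ 0 := by
            simp only [cnt, List.count_cons_self] at h1; push_cast at h1; omega
          have hx : (((x :: tl).count x : Int) == 1) = false := by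
            simp; omega
          simp [h1, h0]

-- ===== VERDICT (by name: the statement is the Claim_ definition above) =====
theorem solve_spec : Claim_equal_solve := by
  intro n arr _
  show solve n arr = solve_alt n arr
  unfold solve solve_alt
  simp only [counterA_getD, counterA_keys]
  rw [loopA (fun k => (arr.count k : Int)), solveLoop_eq]
  set L := PySem.Set.ofList arr with hL
  set q := L.countP (fun k => decide (2 ≤ (arr.count k : Int))) with hq
  set s := L.countP (fun k => ((arr.count k : Int) == 1)) with hs
  have hqs : q + s = L.length := by
    have hs' : s = L.countP (fun k => decide ¬ ((fun k => decide (2 ≤ (arr.count k : Int))) k = true)) := by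
      rw [hs]
      apply List.countP_congr
      intro k hk
      have h1 : 1 ≤ arr.count k := List.count_pos_iff.mpr ((PySem.Set.mem_ofList _ _).mp hk)
      simp only [beq_iff_eq, decide_eq_true_eq]
      constructor
      · intro h; omega
      · intro h; omega
    rw [hs', hq, ← List.length_eq_countP_add_countP]
  by_cases hb : L.any (fun k => (arr.count k : Int) == 1)
  · have hspos : 0 < s := by
      rw [hs]
      obtain ⟨k, hk, hpk⟩ := List.any_eq_true.mp hb
      exact List.countP_pos_iff.mpr ⟨k, hk, hpk⟩
    simp only [hb, Bool.false_or, if_true]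
    rw [PySem.Int.mod_eq_emod_of_pos (by norm_num : (0:Int) < 2)]
    rw [PySem.Int.floordiv_eq_ediv_of_pos (by norm_num : (0:Int) < 2)]
    rw [PySem.Int.floordiv_eq_ediv_of_pos (by norm_num : (0:Int) < 2)]
    omega
  · have hs0 : s = 0 := by
      rw [hs]
      apply List.countP_eq_zero.mpr
      intro k hk
      have := List.any_eq_false.mp (Bool.not_eq_true _ ▸ hb) k hk
      simpa using this
    rw [PySem.Int.floordiv_eq_ediv_of_pos (by norm_num : (0:Int) < 2)]
    rw [PySem.Int.floordiv_eq_ediv_of_pos (by norm_num : (0:Int) < 2)]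
    simp [hb]
    omega
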